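-- pv_equiv track=rewrite | github.com/Ayush32/DSA-Interview-Problems- | Python/Coupa_Interview_Problem/count_the_no_zeros_removed.py | removedZeros
-- ===== SOURCE A (Python) =====
-- def removedZeros(num):
--     first_occ = 0
--     last_occ = 0
--
--     for i in range(len(num)):
--         if num[i] == '1':
--             first_occ = i
--             break
--
--     # find last occ
--     x = len(num) - 1
--     while x >= 0:
--         if num[x] == '1':
--             last_occ = x
--             break
--         x = x - 1
--
--     countZeros = 0
--     for i in range(first_occ,last_occ):
--         if num[i] == '0':
--             countZeros = countZeros + 1
--
--     return countZeros
-- ===== SOURCE B (Python) =====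
-- def removedZeros(num):
--     seen_one = False
--     pending = 0
--     total = 0
--     for ch in num:
--         if ch == '1':
--             if seen_one:
--                 total += pending
--             seen_one = True
--             pending = 0
--         elif ch == '0':
--             if seen_one:
--                 pending += 1
--     return total
-- ===== Notes on version B (the rewrite author's own statement) =====
-- stated objective: simpler
-- what changed: Replaces A's three scans (find first '1', find last '1' from the right, count zeros in the index range) by one streaming left-to-right pass with a seen/pending/total accumulator that commits pending zeros only when another '1' is met.
import Mathlib
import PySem

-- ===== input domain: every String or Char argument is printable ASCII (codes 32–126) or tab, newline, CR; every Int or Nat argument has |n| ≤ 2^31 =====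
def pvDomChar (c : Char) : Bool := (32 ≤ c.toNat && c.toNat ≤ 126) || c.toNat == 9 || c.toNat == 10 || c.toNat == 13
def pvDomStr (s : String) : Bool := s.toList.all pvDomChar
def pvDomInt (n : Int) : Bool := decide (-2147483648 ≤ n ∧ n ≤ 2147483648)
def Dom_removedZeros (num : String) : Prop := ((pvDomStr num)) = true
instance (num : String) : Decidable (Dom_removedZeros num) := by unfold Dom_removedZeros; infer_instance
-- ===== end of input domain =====

-- B replaces A's three scans (first '1', last '1', count zeros in between) by one
-- streaming pass with a seen/pending/total accumulator; objective: simpler.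

-- ===== PORT A =====
-- the `for i in range(len(num)): if num[i] == '1': first_occ = i; break` loop (default 0)
def pvFindFirst : List Char → Nat → Nat
  | [], _ => 0
  | c :: cs, i => if c = '1' then i else pvFindFirst cs (i + 1)

-- the `while x >= 0: … x = x - 1` loop; argument is x+1, 0 encodes x = -1 (default 0)
def pvFindLastAux (cs : List Char) : Nat → Nat
  | 0 => 0
  | x + 1 => if cs.getD x ' ' = '1' then x else pvFindLastAux cs x

def removedZeros (num : String) : Int :=
  let cs := num.toList
  let firstOcc := pvFindFirst cs 0
  let lastOcc := pvFindLastAux cs cs.length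
  (List.range' firstOcc (lastOcc - firstOcc)).foldl
    (fun acc i => if cs.getD i ' ' = '0' then acc + 1 else acc) (0 : Int)

-- ===== PORT B =====
-- state: (seen_one, pending, total)
def pvStep (s : Bool × Int × Int) (c : Char) : Bool × Int × Int :=
  if c = '1' then (true, 0, s.2.2 + (if s.1 then s.2.1 else 0))
  else if c = '0' then (s.1, s.2.1 + (if s.1 then 1 else 0), s.2.2)
  else s

def removedZeros_alt (num : String) : Int :=
  (num.toList.foldl pvStep (false, 0, 0)).2.2

-- ===== PRECONDITION & SPEC =====
def Spec_removedZeros (num : String) (out : Int) : Prop := out = removedZeros_alt num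
instance (num : String) (out : Int) : Decidable (Spec_removedZeros num out) := by unfold Spec_removedZeros; infer_instance

-- ===== CLAIM (what is proved, stated in full; the proofs are below) =====
def Claim_equal_removedZeros : Prop := ∀ (num : String), Dom_removedZeros num → Spec_removedZeros num (removedZeros num)

-- ===== LEMMAS AND PROOFS =====

-- zeros strictly before the last '1' of a list (0 if it has no '1')
def pvZ : List Char → Int
  | [] => 0
  | c :: u => if '1' ∈ u then (if c = '0' then 1 else 0) + pvZ u else 0

theorem pv_getD_append (p l : List Char) (j : Nat) :
    (p ++ l).getD (p.length + j) ' ' = l.getD j ' ' := by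
  simp [List.getD, List.getElem?_append_right]

theorem pvFindFirst_no (cs : List Char) (h : '1' ∉ cs) : ∀ i, pvFindFirst cs i = 0 := by
  induction cs with
  | nil => intro i; rfl
  | cons c cs ih =>
    intro i
    simp only [List.mem_cons, not_or] at h
    have hc : ¬ c = '1' := fun e => h.1 e.symm
    simp [pvFindFirst, hc, ih h.2]

theorem pvFindFirst_split (a b : List Char) (h : '1' ∉ a) :
    ∀ i, pvFindFirst (a ++ '1' :: b) i = i + a.length := by
  induction a with
  | nil => intro i; simp [pvFindFirst]
  | cons c a ih =>
    intro i
    simp only [List.mem_cons, not_or] at h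
    have hc : ¬ c = '1' := fun hc : c = '1' => h.1 hc.symm
    simp [pvFindFirst, hc, ih h.2 (i + 1)]
    omega

theorem pvFindLastAux_skip (cs : List Char) (n : Nat) :
    ∀ k, (∀ j, n ≤ j → j < n + k → cs.getD j ' ' ≠ '1') →
      pvFindLastAux cs (n + k) = pvFindLastAux cs n := by
  intro k
  induction k with
  | zero => intro _; rfl
  | succ k ih =>
    intro h
    have hnk : cs.getD (n + k) ' ' ≠ '1' := h (n + k) (by omega) (by omega)
    have : n + (k + 1) = (n + k) + 1 := by omega
    rw [this]
    simp only [pvFindLastAux, if_neg hnk]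
    exact ih (fun j h1 h2 => h j h1 (by omega))

theorem pvFindLastAux_hit (cs : List Char) (n : Nat) (h : cs.getD n ' ' = '1') :
    pvFindLastAux cs (n + 1) = n := by
  simp only [pvFindLastAux]
  rw [if_pos h]

theorem pv_foldl_count (p : Nat → Prop) [DecidablePred p] :
    ∀ (l : List Nat) (k : Int),
      l.foldl (fun acc i => if p i then acc + 1 else acc) k
        = k + (l.countP (fun i => decide (p i)) : Int) := by
  intro l
  induction l with
  | nil => intro k; simp
  | cons x l ih =>
    intro k
    by_cases hx : p x <;> simp [List.countP_cons, hx, ih] <;> push_cast <;> ring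

theorem pv_count_range :
    ∀ (m pre post : List Char),
      (List.range' pre.length m.length).countP
          (fun i => decide ((pre ++ m ++ post).getD i ' ' = '0'))
        = m.countP (fun c => c == '0') := by
  intro m
  induction m with
  | nil => intro pre post; simp
  | cons c m ih =>
    intro pre post
    have hr : List.range' pre.length (c :: m).length
        = pre.length :: List.range' (pre.length + 1) m.length := by
      simp [List.range'_succ]
    have hhd : (pre ++ (c :: m) ++ post).getD pre.length ' ' = c := by
      have := pv_getD_append pre ((c :: m) ++ post) 0
      simpa using this
    have hre : pre ++ (c :: m) ++ post = (pre ++ [c]) ++ m ++ post := by simp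
    have hlen : pre.length + 1 = (pre ++ [c]).length := by simp
    rw [hr, List.countP_cons, hhd, hre, hlen, ih (pre ++ [c]) post]
    by_cases hc : c = '0' <;> simp [hc, List.countP_cons]

theorem pv_fold_false (u : List Char) (h : '1' ∉ u) (p t : Int) :
    u.foldl pvStep (false, p, t) = (false, p, t) := by
  induction u generalizing p t with
  | nil => rfl
  | cons c u ih =>
    simp only [List.mem_cons, not_or] at h
    have hc : ¬ c = '1' := fun hc : c = '1' => h.1 hc.symm
    by_cases hz : c = '0' <;>
      simp [List.foldl_cons, pvStep, hc, hz, ih h.2]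

theorem pv_fold_true (u : List Char) :
    ∀ (p t : Int), (u.foldl pvStep (true, p, t)).2.2
      = t + (if '1' ∈ u then p + pvZ u else 0) := by
  induction u with
  | nil => intro p t; simp
  | cons c u ih =>
    intro p t
    by_cases hc : c = '1'
    · subst hc
      have s1 : pvStep (true, p, t) '1' = (true, 0, t + p) := by simp [pvStep]
      rw [List.foldl_cons, s1, ih 0 (t + p)]
      by_cases hu : '1' ∈ u <;> simp [pvZ, hu] <;> ring
    · have hmem : ('1' ∈ c :: u) ↔ '1' ∈ u := by
        simp only [List.mem_cons]
        constructor
        · rintro (h | h)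
          · exact absurd h.symm hc
          · exact h
        · exact Or.inr
      by_cases hz : c = '0'
      · subst hz
        have s0 : pvStep (true, p, t) '0' = (true, p + 1, t) := by simp [pvStep]
        rw [List.foldl_cons, s0, ih (p + 1) t]
        by_cases hu : '1' ∈ u <;> simp [pvZ, hu, hmem] <;> ring
      · have so : pvStep (true, p, t) c = (true, p, t) := by simp [pvStep, hc, hz]
        rw [List.foldl_cons, so, ih p t]
        by_cases hu : '1' ∈ u <;> simp [pvZ, hu, hmem, hz]

theorem pvZ_last (r : List Char) (h : '1' ∉ r) :
    ∀ m, pvZ (m ++ '1' :: r) = (m.countP (fun c => c == '0') : Int) := by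
  intro m
  induction m with
  | nil => simp [pvZ, h]
  | cons c m ih =>
    have hmem : '1' ∈ m ++ '1' :: r := by simp
    rw [List.cons_append, pvZ, if_pos hmem, ih, List.countP_cons]
    by_cases hc : c = '0' <;> simp [hc] <;> push_cast <;> ring

theorem pv_mem_split_first (a : Char) (l : List Char) (h : a ∈ l) :
    ∃ p q, l = p ++ a :: q ∧ a ∉ p := by
  induction l with
  | nil => cases h
  | cons c l ih =>
    by_cases hc : c = a
    · exact ⟨[], l, by simp [hc], by simp⟩
    · have : a ∈ l := by
        rcases List.mem_cons.mp h with h' | h'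
        · exact absurd h'.symm hc
        · exact h'
      obtain ⟨p, q, hpq, hnp⟩ := ih this
      exact ⟨c :: p, q, by simp [hpq], by
        simp only [List.mem_cons, not_or]
        exact ⟨fun h' => hc h'.symm, hnp⟩⟩

theorem pv_getD_mem (cs : List Char) (j : Nat) (hj : j < cs.length) :
    cs.getD j ' ' ∈ cs := by
  rw [List.getD_eq_getElem cs ' ' hj]
  exact List.getElem_mem hj

-- ===== VERDICT (by name: the statement is the Claim_ definition above) =====
theorem removedZeros_spec : Claim_equal_removedZeros := by
  intro num _
  unfold Spec_removedZeros removedZeros removedZeros_alt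
  dsimp only
  set cs := num.toList with hcs
  by_cases h1 : '1' ∈ cs
  · obtain ⟨a, b, hab, hna⟩ := pv_mem_split_first '1' cs h1
    by_cases h2 : '1' ∈ b
    · -- at least two '1's: split b at its last '1'
      have h2r : '1' ∈ b.reverse := by simpa using h2
      obtain ⟨p, q, hpq, hnp⟩ := pv_mem_split_first '1' b.reverse h2r
      have hb : b = q.reverse ++ '1' :: p.reverse := by
        have := congrArg List.reverse hpq
        simpa using this
      have hnr : '1' ∉ p.reverse := by simpa using hnp
      set m := q.reverse with hm
      set r := p.reverse with hrr
      have hcs2 : cs = a ++ '1' :: m ++ '1' :: r := by rw [hab, hb]; simp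
      -- first occurrence
      have hfirst : pvFindFirst cs 0 = a.length := by
        rw [hab]; simpa using pvFindFirst_split a b hna 0
      -- last occurrence
      have hlen : cs.length = (a.length + 1 + m.length + 1) + r.length := by
        rw [hcs2]; simp; omega
      have hskip : pvFindLastAux cs ((a.length + 1 + m.length + 1) + r.length)
          = pvFindLastAux cs (a.length + 1 + m.length + 1) := by
        apply pvFindLastAux_skip
        intro j hj1 hj2 hcontra
        have hj : j = (a ++ '1' :: m ++ ['1']).length + (j - (a.length + m.length + 2)) := by
          simp; omega
        rw [hcs2] at hcontra
        have hre : a ++ '1' :: m ++ '1' :: r = (a ++ '1' :: m ++ ['1']) ++ r := by simp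
        rw [hre, hj, pv_getD_append] at hcontra
        exact hnr (by
          have hjr : j - (a.length + m.length + 2) < r.length := by omega
          rw [← hcontra]
          exact pv_getD_mem r _ hjr)
      have hhit : pvFindLastAux cs (a.length + 1 + m.length + 1) = a.length + 1 + m.length := by
        have : cs.getD (a.length + 1 + m.length) ' ' = '1' := by
          have hre : cs = (a ++ '1' :: m) ++ '1' :: r := by rw [hcs2]
          have hl : a.length + 1 + m.length = (a ++ '1' :: m).length + 0 := by simp; omega
          rw [hre, hl, pv_getD_append]; rfl
        have := pvFindLastAux_hit cs (a.length + 1 + m.length) this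
        simpa using this
      have hlast : pvFindLastAux cs cs.length = a.length + 1 + m.length := by
        rw [hlen, hskip, hhit]
      -- A's value
      have hdiff : (a.length + 1 + m.length) - a.length = ('1' :: m).length := by simp; omega
      have hA : (List.range' (pvFindFirst cs 0) (pvFindLastAux cs cs.length - pvFindFirst cs 0)).foldl
            (fun acc i => if cs.getD i ' ' = '0' then acc + 1 else acc) (0 : Int)
          = (m.countP (fun c => c == '0') : Int) := by
        rw [hfirst, hlast, hdiff, pv_foldl_count]
        have hre : cs = a ++ ('1' :: m) ++ ('1' :: r) := by rw [hcs2]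
        rw [hre]
        have := pv_count_range ('1' :: m) a ('1' :: r)
        rw [this]
        simp [List.countP_cons]
      -- B's value
      have hB : ((a ++ '1' :: b).foldl pvStep (false, 0, 0)).2.2
          = (m.countP (fun c => c == '0') : Int) := by
        rw [List.foldl_append, pv_fold_false a hna]
        have hstep : pvStep (false, (0 : Int), (0 : Int)) '1' = (true, 0, 0) := by
          simp [pvStep]
        rw [List.foldl_cons, hstep, pv_fold_true b 0 0, if_pos h2, hb,
          pvZ_last r hnr m]
        simp
      rw [hA, hab, hB]
    · -- exactly one '1'
      have hfirst : pvFindFirst cs 0 = a.length := by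
        rw [hab]; simpa using pvFindFirst_split a b hna 0
      have hlen : cs.length = (a.length + 1) + b.length := by rw [hab]; simp; omega
      have hskip : pvFindLastAux cs ((a.length + 1) + b.length)
          = pvFindLastAux cs (a.length + 1) := by
        apply pvFindLastAux_skip
        intro j hj1 hj2 hcontra
        have hj : j = (a ++ ['1']).length + (j - (a.length + 1)) := by simp; omega
        rw [hab] at hcontra
        have hre : a ++ '1' :: b = (a ++ ['1']) ++ b := by simp
        rw [hre, hj, pv_getD_append] at hcontra
        exact h2 (by
          have hjr : j - (a.length + 1) < b.length := by omega
          rw [← hcontra]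
          exact pv_getD_mem b _ hjr)
      have hhit : pvFindLastAux cs (a.length + 1) = a.length := by
        apply pvFindLastAux_hit
        have hl : a.length = a.length + 0 := by omega
        rw [hab, hl, pv_getD_append]; rfl
      have hlast : pvFindLastAux cs cs.length = a.length := by rw [hlen, hskip, hhit]
      have hB : ((a ++ '1' :: b).foldl pvStep (false, 0, 0)).2.2 = (0 : Int) := by
        rw [List.foldl_append, pv_fold_false a hna]
        have hstep : pvStep (false, (0 : Int), (0 : Int)) '1' = (true, 0, 0) := by
          simp [pvStep]
        rw [List.foldl_cons, hstep, pv_fold_true b 0 0, if_neg h2]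
        simp
      rw [hfirst, hlast, hab, hB]
      simp
  · -- no '1' at all
    have hfirst : pvFindFirst cs 0 = 0 := pvFindFirst_no cs h1 0
    have hlast : pvFindLastAux cs cs.length = 0 := by
      have hskip : pvFindLastAux cs (0 + cs.length) = pvFindLastAux cs 0 := by
        apply pvFindLastAux_skip
        intro j _ hj2 hcontra
        exact h1 (hcontra ▸ pv_getD_mem cs j (by omega))
      simpa [pvFindLastAux] using hskip
    have hB : (cs.foldl pvStep (false, 0, 0)).2.2 = (0 : Int) := by
      rw [pv_fold_false cs h1]
    rw [hfirst, hlast, hB]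
    simp
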